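-- pv_equiv track=rewrite | github.com/uzaneran/Devops0909 | lesson_2/assignment2.py | pyramid_of_asterisks
-- ===== SOURCE A (Python) =====
-- def pyramid_of_asterisks(height):
--     result = ""
--     for i in range(height):
--         string = ""
--         for n in range(i + 1):
--             string += "*"
--         result += string + "\n"
--     return result
-- ===== SOURCE B (Python) =====
-- def pyramid_of_asterisks(height):
--     rows = []
--     line = ""
--     for _ in range(height):
--         line += "*"
--         rows.append(line + "\n")
--     return "".join(rows)
-- ===== Notes on version B (the rewrite author's own statement) =====
-- stated objective: faster
-- what changed: The inner loop that rebuilds each row from scratch is removed; a single pass carries the previous row as state and extends it by one asterisk per iteration.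
import Mathlib
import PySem

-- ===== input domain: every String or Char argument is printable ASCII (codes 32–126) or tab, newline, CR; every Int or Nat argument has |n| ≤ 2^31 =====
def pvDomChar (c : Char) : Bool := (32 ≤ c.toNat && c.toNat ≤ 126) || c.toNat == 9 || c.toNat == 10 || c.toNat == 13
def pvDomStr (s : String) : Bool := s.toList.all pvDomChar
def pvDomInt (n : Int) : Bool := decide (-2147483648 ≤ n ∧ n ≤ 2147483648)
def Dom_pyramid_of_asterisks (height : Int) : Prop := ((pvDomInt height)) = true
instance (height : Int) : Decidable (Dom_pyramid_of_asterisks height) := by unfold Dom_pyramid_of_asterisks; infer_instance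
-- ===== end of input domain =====

-- B drops A's inner row-building loop: one pass carries the previous row and extends it by one '*'.
-- Strings are accumulated as List Char and wrapped with String.mk at the end (exact: only '+=' concatenation occurs).

-- ===== PORT A =====
def pyramid_of_asterisks (height : Int) : String :=
  String.mk <|
    (PySem.List.pyRange 0 height 1).foldl
      (fun result i =>
        result ++ ((PySem.List.pyRange 0 (i + 1) 1).foldl (fun s _ => s ++ ['*']) []) ++ ['\n'])
      []

-- ===== PORT B =====
def pyramid_of_asterisks_alt (height : Int) : String :=
  String.mk
    ((PySem.List.pyRange 0 height 1).foldl
      (fun (p : List Char × List (List Char)) _ =>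
        let line := p.1 ++ ['*']
        (line, p.2 ++ [line ++ ['\n']]))
      ([], [])).2.flatten

-- ===== PRECONDITION & SPEC =====
def Spec_pyramid_of_asterisks (height : Int) (out : String) : Prop := out = pyramid_of_asterisks_alt height
instance (height : Int) (out : String) : Decidable (Spec_pyramid_of_asterisks height out) := by unfold Spec_pyramid_of_asterisks; infer_instance

-- ===== CLAIM (what is proved, stated in full; the proofs are below) =====
def Claim_equal_pyramid_of_asterisks : Prop := ∀ (height : Int), Dom_pyramid_of_asterisks height → Spec_pyramid_of_asterisks height (pyramid_of_asterisks height)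

-- ===== LEMMAS AND PROOFS =====

-- A's inner loop appends one '*' per element: it yields s ++ replicate (length) '*'.
theorem pv_inner_fold {α : Type} (l : List α) (s : List Char) :
    l.foldl (fun s _ => s ++ ['*']) s = s ++ List.replicate l.length '*' := by
  induction l generalizing s with
  | nil => simp
  | cons a t ih => simp [List.foldl, ih, List.replicate_succ]

-- B's fold in closed form: the carried line is replicate n '*', the rows are the mapped range.
theorem pv_B (n : Nat) :
    (PySem.List.pyRange 0 (n : Int) 1).foldl
      (fun (p : List Char × List (List Char)) _ =>
        let line := p.1 ++ ['*']
        (line, p.2 ++ [line ++ ['\n']]))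
      ([], [])
    = (List.replicate n '*',
       (List.range n).map (fun k => List.replicate (k + 1) '*' ++ ['\n'])) := by
  induction n with
  | zero => simp [PySem.List.pyRange_one_eq_nil]
  | succ m ih =>
    have hcast : (((m + 1 : Nat)) : Int) = ((m : Int) + 1) := by push_cast; ring
    have hsplit : PySem.List.pyRange 0 ((m : Int) + 1) 1
        = PySem.List.pyRange 0 (m : Int) 1 ++ [(m : Int)] := by
      exact PySem.List.pyRange_one_succ_right (by exact_mod_cast Nat.zero_le m)
    rw [hcast, hsplit, List.foldl_append, ih]
    simp [List.range_succ, List.replicate_succ']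

-- A's fold in closed form: the flatten of the same mapped range.
theorem pv_A (n : Nat) :
    (PySem.List.pyRange 0 (n : Int) 1).foldl
      (fun result i =>
        result ++ ((PySem.List.pyRange 0 (i + 1) 1).foldl (fun s _ => s ++ ['*']) []) ++ ['\n'])
      []
    = ((List.range n).map (fun k => List.replicate (k + 1) '*' ++ ['\n'])).flatten := by
  induction n with
  | zero => simp [PySem.List.pyRange_one_eq_nil]
  | succ m ih =>
    have hcast : (((m + 1 : Nat)) : Int) = ((m : Int) + 1) := by push_cast; ring
    have hsplit : PySem.List.pyRange 0 ((m : Int) + 1) 1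
        = PySem.List.pyRange 0 (m : Int) 1 ++ [(m : Int)] := by
      exact PySem.List.pyRange_one_succ_right (by exact_mod_cast Nat.zero_le m)
    rw [hcast, hsplit, List.foldl_append, ih]
    simp only [List.foldl, pv_inner_fold, PySem.List.length_pyRange_one]
    have h1 : ((m : Int) + 1 - 0).toNat = m + 1 := by omega
    rw [h1]
    simp [List.range_succ]

-- ===== VERDICT (by name: the statement is the Claim_ definition above) =====
theorem pyramid_of_asterisks_spec : Claim_equal_pyramid_of_asterisks := by
  intro height _
  unfold Spec_pyramid_of_asterisks pyramid_of_asterisks pyramid_of_asterisks_alt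
  by_cases h : height ≤ 0
  · rw [PySem.List.pyRange_one_eq_nil h]; rfl
  · have hh : height = ((height.toNat : Nat) : Int) := by omega
    rw [hh, pv_A height.toNat, pv_B height.toNat]
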